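-- pv_equiv track=rewrite | github.com/wooden33/BanG | src/panta/prompt_builder.py | pick_two_paths
-- ===== SOURCE A (Python) =====
-- def pick_two_paths(candidate_paths, path_history, max_visit=10):
--
--     if not candidate_paths:
--         return None, None  # Handle empty input safely
--
--     # Add visit count to each candidate path for comparison
--     paths_with_visits = [
--         (path, path_history.get(path[4], 0))  # path[4] is path_label
--         for path in candidate_paths
--     ]
--
--     filtered_paths = [path for path in paths_with_visits if path[1] < max_visit]
--
--     # Handle case where all paths are over-visited
--     if not filtered_paths:
--         return None, None
--
--     # Exploitation: Pick highest-missed-value path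
--     highest_missed_path = max(filtered_paths, key=lambda x: x[0][0])[0]
--
--     # Exploration: Pick least-visited path
--     least_visited_path = max(filtered_paths, key=lambda x: -x[1])[0]  # Extract the path
--
--     return highest_missed_path, least_visited_path
-- ===== SOURCE B (Python) =====
-- def pick_two_paths(candidate_paths, path_history, max_visit=10):
--     # Single fused pass: filter, highest-value and least-visited trackers in one loop.
--     best = None
--     least = None  # (path, visit_count)
--     for path in candidate_paths:
--         v = path_history.get(path[4], 0)
--         if v >= max_visit:
--             continue
--         if best is None or path[0] > best[0]:
--             best = path
--         if least is None or v < least[1]: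
--             least = (path, v)
--     if best is None:
--         return None, None
--     return best, least[0]
-- ===== Notes on version B (the rewrite author's own statement) =====
-- stated objective: alternative
-- what changed: B replaces A's build-annotated-list, filter, and two separate max scans with one fused loop over candidate_paths that filters inline and maintains both the highest-value and least-visited trackers in a single pass.
import Mathlib
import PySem

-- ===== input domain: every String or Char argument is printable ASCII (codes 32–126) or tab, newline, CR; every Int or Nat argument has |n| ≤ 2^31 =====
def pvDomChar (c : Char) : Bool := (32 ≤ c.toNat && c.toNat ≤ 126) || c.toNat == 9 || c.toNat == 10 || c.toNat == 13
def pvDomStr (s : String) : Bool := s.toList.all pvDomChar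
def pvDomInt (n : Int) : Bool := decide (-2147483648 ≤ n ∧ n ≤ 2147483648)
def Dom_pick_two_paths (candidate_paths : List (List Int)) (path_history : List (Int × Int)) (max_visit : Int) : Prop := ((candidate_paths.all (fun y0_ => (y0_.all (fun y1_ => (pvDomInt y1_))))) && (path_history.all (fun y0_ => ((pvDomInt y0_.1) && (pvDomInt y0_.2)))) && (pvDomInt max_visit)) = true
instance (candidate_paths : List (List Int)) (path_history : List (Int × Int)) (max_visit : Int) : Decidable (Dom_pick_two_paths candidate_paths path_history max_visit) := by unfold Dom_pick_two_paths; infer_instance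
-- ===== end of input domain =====

-- B fuses A's annotate/filter/two-max-scans into one loop keeping both trackers (alternative decomposition, same cost class).

-- ===== PORT A =====
-- path_history.get(path[4], 0) is ported as Dict.getD; path[4] is exact under Pre_ (length ≥ 5), so the .getD 0 on pyGet? never fires there
def pick_two_paths (candidate_paths : List (List Int)) (path_history : List (Int × Int)) (max_visit : Int) : Option (List Int) × Option (List Int) :=
  if candidate_paths = [] then (none, none)
  else
    let hist := PySem.Dict.ofList path_history
    let paths_with_visits := candidate_paths.map (fun path => (path, PySem.Dict.getD hist ((PySem.List.pyGet? path 4).getD 0) 0))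
    let filtered := paths_with_visits.filter (fun x => decide (x.2 < max_visit))
    if filtered = [] then (none, none)
    else
      match PySem.List.max? filtered (fun x => (PySem.List.pyGet? x.1 0).getD 0),
            PySem.List.max? filtered (fun x => -x.2) with
      | some hm, some lv => (some hm.1, some lv.1)
      | _, _ => (none, none)   -- unreachable: filtered ≠ []

-- ===== PORT B =====
-- the loop body of Source B: skip over-visited, update best (strict >) and least (strict <, kept with its count)
def pvAltStep (hist : PySem.Dict Int Int) (max_visit : Int)
    (st : Option (List Int) × Option (List Int × Int)) (path : List Int) :
    Option (List Int) × Option (List Int × Int) :=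
  let v := PySem.Dict.getD hist ((PySem.List.pyGet? path 4).getD 0) 0
  if max_visit ≤ v then st
  else
    let best := match st.1 with
      | none => some path
      | some b => if ((PySem.List.pyGet? b 0).getD 0 : Int) < (PySem.List.pyGet? path 0).getD 0 then some path else some b
    let least := match st.2 with
      | none => some (path, v)
      | some l => if v < l.2 then some (path, v) else some l
    (best, least)

def pick_two_paths_alt (candidate_paths : List (List Int)) (path_history : List (Int × Int)) (max_visit : Int) : Option (List Int) × Option (List Int) :=
  let hist := PySem.Dict.ofList path_history
  let r := candidate_paths.foldl (pvAltStep hist max_visit) (none, none)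
  -- Source B: 'if best is None: return None, None'; else least is also set, 'return best, least[0]'
  match r.1 with
  | none => (none, none)
  | some b => (some b, r.2.map Prod.fst)

-- ===== PRECONDITION & SPEC =====
-- Pre_ excludes exactly the inputs where A raises IndexError: a candidate path with fewer than 5 elements (path[4]).
def Pre_pick_two_paths (candidate_paths : List (List Int)) (path_history : List (Int × Int)) (max_visit : Int) : Prop :=
  ∀ p ∈ candidate_paths, 5 ≤ p.length
instance (candidate_paths : List (List Int)) (path_history : List (Int × Int)) (max_visit : Int) : Decidable (Pre_pick_two_paths candidate_paths path_history max_visit) := by unfold Pre_pick_two_paths; infer_instance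

def pvWitness_pick_two_paths : List (List Int) × (List (Int × Int)) × Int :=
  ([[1, 2, 3, 4, 5], [9, 0, 0, 0, 7]], [(5, 2), (7, 1)], 10)

def Spec_pick_two_paths (candidate_paths : List (List Int)) (path_history : List (Int × Int)) (max_visit : Int) (out : Option (List Int) × Option (List Int)) : Prop := out = pick_two_paths_alt candidate_paths path_history max_visit
instance (candidate_paths : List (List Int)) (path_history : List (Int × Int)) (max_visit : Int) (out : Option (List Int) × Option (List Int)) : Decidable (Spec_pick_two_paths candidate_paths path_history max_visit out) := by unfold Spec_pick_two_paths; infer_instance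

-- ===== CLAIM (what is proved, stated in full; the proofs are below) =====
def Claim_equal_pick_two_paths : Prop := ∀ (candidate_paths : List (List Int)) (path_history : List (Int × Int)) (max_visit : Int), Dom_pick_two_paths candidate_paths path_history max_visit → Pre_pick_two_paths candidate_paths path_history max_visit → Spec_pick_two_paths candidate_paths path_history max_visit (pick_two_paths candidate_paths path_history max_visit)

-- ===== LEMMAS AND PROOFS =====

-- proof-side abbreviation for the visit count both ports compute
def pvVisits (hist : PySem.Dict Int Int) (path : List Int) : Int :=
  PySem.Dict.getD hist ((PySem.List.pyGet? path 4).getD 0) 0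

-- A's two max-scan step functions, named so the foldl invariant can speak about them
def pvM1 (acc : Option (List Int × Int)) (x : List Int × Int) : Option (List Int × Int) :=
  match acc with
  | none => some x
  | some m => if ((PySem.List.pyGet? m.1 0).getD 0 : Int) < (PySem.List.pyGet? x.1 0).getD 0 then some x else some m

def pvM2 (acc : Option (List Int × Int)) (x : List Int × Int) : Option (List Int × Int) :=
  match acc with
  | none => some x
  | some m => if -m.2 < -x.2 then some x else some m

theorem pvMax1_eq (xs : List (List Int × Int)) :
    PySem.List.max? xs (fun x => (PySem.List.pyGet? x.1 0).getD 0) = xs.foldl pvM1 none := by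
  unfold PySem.List.max?
  congr 1
  funext acc x
  cases acc <;> rfl

theorem pvMax2_eq (xs : List (List Int × Int)) :
    PySem.List.max? xs (fun x => -x.2) = xs.foldl pvM2 none := by
  unfold PySem.List.max?
  congr 1
  funext acc x
  cases acc <;> rfl

theorem pvM1_foldl_some (t : List (List Int × Int)) (a : List Int × Int) :
    ∃ y, t.foldl pvM1 (some a) = some y := by
  induction t generalizing a with
  | nil => exact ⟨a, rfl⟩
  | cons x t ih =>
      simp only [List.foldl_cons, pvM1]
      split <;> exact ih _

theorem pvM2_foldl_some (t : List (List Int × Int)) (a : List Int × Int) :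
    ∃ y, t.foldl pvM2 (some a) = some y := by
  induction t generalizing a with
  | nil => exact ⟨a, rfl⟩
  | cons x t ih =>
      simp only [List.foldl_cons, pvM2]
      split <;> exact ih _

theorem pvVisits_def (hist : PySem.Dict Int Int) (path : List Int) :
    PySem.Dict.getD hist ((PySem.List.pyGet? path 4).getD 0) 0 = pvVisits hist path := rfl

theorem pvAltStep_skip (hist : PySem.Dict Int Int) (mv : Int) (st : Option (List Int) × Option (List Int × Int))
    (path : List Int) (h : mv ≤ pvVisits hist path) : pvAltStep hist mv st path = st := by
  simp only [pvAltStep]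
  rw [pvVisits_def hist path]
  exact if_pos h

theorem pvAltStep_keep (hist : PySem.Dict Int Int) (mv : Int) (b l : Option (List Int × Int))
    (path : List Int) (h : ¬ mv ≤ pvVisits hist path) :
    pvAltStep hist mv (b.map Prod.fst, l) path
      = ((pvM1 b (path, pvVisits hist path)).map Prod.fst, pvM2 l (path, pvVisits hist path)) := by
  simp only [pvAltStep]
  rw [pvVisits_def hist path, if_neg h]
  cases b <;> cases l <;>
    simp [pvM1, pvM2, neg_lt_neg_iff] <;>
    split <;> simp

-- the loop invariant: B's fused fold computes A's two max-folds over the filtered annotated list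
theorem pvLoop_inv (hist : PySem.Dict Int Int) (mv : Int) (cps : List (List Int)) :
    ∀ (b l : Option (List Int × Int)),
    cps.foldl (pvAltStep hist mv) (b.map Prod.fst, l)
      = ((((cps.map (fun p => (p, pvVisits hist p))).filter (fun x => decide (x.2 < mv))).foldl pvM1 b).map Prod.fst,
         (((cps.map (fun p => (p, pvVisits hist p))).filter (fun x => decide (x.2 < mv))).foldl pvM2 l)) := by
  induction cps with
  | nil => intro b l; rfl
  | cons p t ih =>
      intro b l
      by_cases hv : mv ≤ pvVisits hist p
      · have hd : decide ((pvVisits hist p : Int) < mv) = false := by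
          simp; omega
        simp only [List.foldl_cons, List.map_cons, List.filter_cons, hd, Bool.false_eq_true,
          if_false, pvAltStep_skip hist mv _ p hv]
        exact ih b l
      · have hd : decide ((pvVisits hist p : Int) < mv) = true := by
          simp; omega
        simp only [List.foldl_cons, List.map_cons, List.filter_cons, hd, if_true,
          pvAltStep_keep hist mv b l p hv]
        exact ih _ _

theorem pick_two_paths_eq (candidate_paths : List (List Int)) (path_history : List (Int × Int)) (max_visit : Int) :
    pick_two_paths candidate_paths path_history max_visit
      = pick_two_paths_alt candidate_paths path_history max_visit := by
  unfold pick_two_paths pick_two_paths_alt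
  have hloop := pvLoop_inv (PySem.Dict.ofList path_history) max_visit candidate_paths none none
  simp only [Option.map_none] at hloop
  by_cases hcs : candidate_paths = []
  · subst hcs; rfl
  · simp only [if_neg hcs, pvVisits_def]
    rw [hloop, pvMax1_eq, pvMax2_eq]
    cases hf : ((candidate_paths.map (fun p => (p, pvVisits (PySem.Dict.ofList path_history) p))).filter
        (fun x => decide (x.2 < max_visit))) with
    | nil => simp
    | cons x t =>
        simp only [if_neg (by simp : x :: t ≠ []), List.foldl_cons]
        have h1 : pvM1 none x = some x := rfl
        have h2 : pvM2 none x = some x := rfl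
        rw [h1, h2]
        obtain ⟨y1, hy1⟩ := pvM1_foldl_some t x
        obtain ⟨y2, hy2⟩ := pvM2_foldl_some t x
        rw [hy1, hy2]
        rfl

-- ===== VERDICT (by name: the statement is the Claim_ definition above) =====
theorem pick_two_paths_spec : Claim_equal_pick_two_paths := by
  intro cps ph mv _ _
  exact pick_two_paths_eq cps ph mv
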